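-- pv_equiv track=rewrite | github.com/islerm2-nku/CSC-640-MI-Part2 | app/services/lap_service.py | _parse_lap_indices
-- ===== SOURCE A (Python) =====
-- from typing import List, Dict, Optional
--
-- def _parse_lap_indices(lap_data: List) -> List[Dict]:
--     """
--     Parse lap data array to find start and end indices for each lap.
--
--     Args:
--         lap_data: Array of lap numbers indexed by sample position
--
--     Returns:
--         Array of laps with their start and end indices
--     """
--     if not lap_data:
--         return []
--
--     laps = []
--     current_lap = None
--     start_index = None
--
--     for index, lap_number in enumerate(lap_data):
--         # Skip if lap number is 0 or negative (usually warmup/cooldown)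
--         if lap_number <= 0:
--             continue
--
--         # New lap detected
--         if current_lap != lap_number:
--             # Save previous lap if it exists
--             if current_lap is not None and start_index is not None:
--                 laps.append({
--                     'lap_number': current_lap,
--                     'start_index': start_index,
--                     'end_index': index - 1,
--                     'sample_count': (index - 1) - start_index + 1
--                 })
--
--             # Start new lap
--             current_lap = lap_number
--             start_index = index
--
--     # Add the last lap
--     if current_lap is not None and start_index is not None:
--         last_index = len(lap_data) - 1
--         laps.append({
--             'lap_number': current_lap,
--             'start_index': start_index,
--             'end_index': last_index,
--             'sample_count': last_index - start_index + 1
--         })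
--
--     return laps
-- ===== SOURCE B (Python) =====
-- def _parse_lap_indices(lap_data):
--     # Pass 1: boundary list of (start_index, lap_number) for each new positive lap
--     bounds = []
--     last = None
--     for i, x in enumerate(lap_data):
--         if x > 0 and x != last:
--             bounds.append((i, x))
--             last = x
--     # Pass 2: pair each boundary with its successor (None for the last one)
--     laps = []
--     for (s, lap), nxt in zip(bounds, bounds[1:] + [None]):
--         e = nxt[0] - 1 if nxt is not None else len(lap_data) - 1
--         laps.append({
--             'lap_number': lap,
--             'start_index': s,
--             'end_index': e,
--             'sample_count': e - s + 1
--         })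
--     return laps
-- ===== Notes on version B (the rewrite author's own statement) =====
-- stated objective: alternative
-- what changed: Replaces A's single stateful pass (emitting a lap whenever the tracked current lap closes, with dangling last-lap state flushed after the loop) by two passes: first collect the lap-boundary list (start_index, lap_number), then emit each lap by pairing every boundary with its successor.
import Mathlib
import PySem

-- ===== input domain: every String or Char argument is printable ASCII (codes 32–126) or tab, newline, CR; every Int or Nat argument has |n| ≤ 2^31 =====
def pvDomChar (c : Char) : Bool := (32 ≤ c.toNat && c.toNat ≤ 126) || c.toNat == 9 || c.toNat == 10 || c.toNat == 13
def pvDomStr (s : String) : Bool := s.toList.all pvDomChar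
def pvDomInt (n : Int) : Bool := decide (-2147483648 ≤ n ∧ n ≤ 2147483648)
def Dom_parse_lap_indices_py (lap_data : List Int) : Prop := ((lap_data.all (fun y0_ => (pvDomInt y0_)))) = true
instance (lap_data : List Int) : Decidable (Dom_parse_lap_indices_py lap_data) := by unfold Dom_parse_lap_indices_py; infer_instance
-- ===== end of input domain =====

-- B replaces A's single stateful emit-on-close pass by a boundary list plus a pairwise second pass (alternative decomposition, same cost).

-- ===== PORT A =====
-- the lap dict, in A's key insertion order (sample_count = end - start + 1, as written in A)
def pvMkLap (lap : Int) (s : Int) (e : Int) : List (String × Int) :=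
  [("lap_number", lap), ("start_index", s), ("end_index", e), ("sample_count", e - s + 1)]

-- A's for-loop: state = (laps, current_lap, start_index)
def pvALoop : List (Int × Int) → List (List (String × Int)) → Option Int → Option Int →
    List (List (String × Int)) × Option Int × Option Int
  | [], laps, cur, st => (laps, cur, st)
  | (i, x) :: rest, laps, cur, st =>
    if x ≤ 0 then pvALoop rest laps cur st
    else if cur ≠ some x then
      let laps' := match cur, st with
        | some c, some s => laps ++ [pvMkLap c s (i - 1)]
        | _, _ => laps
      pvALoop rest laps' (some x) (some i)
    else pvALoop rest laps cur st

def parse_lap_indices_py (lap_data : List Int) : List (List (String × Int)) :=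
  if lap_data = [] then []
  else
    match pvALoop (PySem.List.enumerate lap_data) [] none none with
    | (laps, some c, some s) => laps ++ [pvMkLap c s ((lap_data.length : Int) - 1)]
    | (laps, _, _) => laps

-- ===== PORT B =====
-- pass 1: boundary list of (start_index, lap_number)
def pvBounds : List (Int × Int) → Option Int → List (Int × Int) → List (Int × Int)
  | [], _, acc => acc
  | (i, x) :: rest, last, acc =>
    if 0 < x ∧ some x ≠ last then pvBounds rest (some x) (acc ++ [(i, x)])
    else pvBounds rest last acc

-- pass 2: each boundary paired with its successor (none for the last): zip(bounds, bounds[1:] + [None])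
def pvEmit (n : Int) : List (Int × Int) → List (List (String × Int))
  | [] => []
  | [(s, lap)] => [pvMkLap lap s (n - 1)]
  | (s, lap) :: (s', lap') :: rest => pvMkLap lap s (s' - 1) :: pvEmit n ((s', lap') :: rest)

def parse_lap_indices_py_alt (lap_data : List Int) : List (List (String × Int)) :=
  pvEmit (lap_data.length : Int) (pvBounds (PySem.List.enumerate lap_data) none [])

-- ===== PRECONDITION & SPEC =====
def Spec_parse_lap_indices_py (lap_data : List Int) (out : List (List (String × Int))) : Prop := out = parse_lap_indices_py_alt lap_data
instance (lap_data : List Int) (out : List (List (String × Int))) : Decidable (Spec_parse_lap_indices_py lap_data out) := by unfold Spec_parse_lap_indices_py; infer_instance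

-- ===== CLAIM (what is proved, stated in full; the proofs are below) =====
def Claim_equal_parse_lap_indices_py : Prop := ∀ (lap_data : List Int), Dom_parse_lap_indices_py lap_data → Spec_parse_lap_indices_py lap_data (parse_lap_indices_py lap_data)

-- ===== LEMMAS AND PROOFS =====

-- flushing A's final state, as the code after A's loop does
def pvFinish (n : Int) : List (List (String × Int)) × Option Int × Option Int → List (List (String × Int))
  | (laps, some c, some s) => laps ++ [pvMkLap c s (n - 1)]
  | (laps, _, _) => laps

theorem pvBounds_acc (l : List (Int × Int)) (last : Option Int) (acc : List (Int × Int)) :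
    pvBounds l last acc = acc ++ pvBounds l last [] := by
  induction l generalizing last acc with
  | nil => simp [pvBounds]
  | cons p rest ih =>
    obtain ⟨i, x⟩ := p
    by_cases h : 0 < x ∧ some x ≠ last
    · rw [pvBounds, if_pos h, pvBounds, if_pos h,
        ih (some x) (acc ++ [(i, x)]), ih (some x) ([] ++ [(i, x)])]
      simp
    · rw [pvBounds, if_neg h, pvBounds, if_neg h, ih]

-- invariant while a lap is open: A's remaining loop + flush = emitted laps ++ pairwise emission of (open boundary :: remaining boundaries)
theorem pvLoop_some (n : Int) (l : List (Int × Int)) :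
    ∀ (laps : List (List (String × Int))) (c : Int) (s : Int),
      pvFinish n (pvALoop l laps (some c) (some s)) =
        laps ++ pvEmit n ((s, c) :: pvBounds l (some c) []) := by
  induction l with
  | nil => intro laps c s; simp [pvALoop, pvBounds, pvEmit, pvFinish]
  | cons p rest ih =>
    intro laps c s
    obtain ⟨i, x⟩ := p
    by_cases hx : x ≤ 0
    · have hb : ¬ (0 < x ∧ some x ≠ some c) := by omega
      rw [pvALoop, if_pos hx, pvBounds, if_neg hb, ih]
    · by_cases hc : x = c
      · subst hc
        have hb : ¬ (0 < x ∧ some x ≠ some x) := by simp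
        rw [pvALoop, if_neg hx]
        simp only [ne_eq, not_true_eq_false, if_false]
        rw [pvBounds, if_neg hb, ih]
      · have hb : 0 < x ∧ some x ≠ some c := ⟨by omega, by simp [hc]⟩
        rw [pvALoop, if_neg hx]
        have hne : some x ≠ some c := by simp [hc]
        simp only [ne_eq, Option.some.injEq]
        rw [if_pos (by exact fun h => hc h.symm)]
        rw [pvBounds, if_pos hb, pvBounds_acc, ih]
        simp [pvEmit]

-- before any lap is open
theorem pvLoop_none (n : Int) (l : List (Int × Int)) :
    ∀ (laps : List (List (String × Int))),
      pvFinish n (pvALoop l laps none none) = laps ++ pvEmit n (pvBounds l none []) := by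
  induction l with
  | nil => intro laps; simp [pvALoop, pvBounds, pvEmit, pvFinish]
  | cons p rest ih =>
    intro laps
    obtain ⟨i, x⟩ := p
    by_cases hx : x ≤ 0
    · have hb : ¬ (0 < x ∧ some x ≠ none) := by omega
      rw [pvALoop, if_pos hx, pvBounds, if_neg hb, ih]
      simp
    · have hb : 0 < x ∧ some x ≠ (none : Option Int) := ⟨by omega, by simp⟩
      rw [pvALoop, if_neg hx]
      simp only [ne_eq, reduceCtorEq, not_false_eq_true, if_true]
      rw [pvBounds, if_pos hb, pvBounds_acc, pvLoop_some]
      simp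
      simp

-- ===== VERDICT (by name: the statement is the Claim_ definition above) =====
theorem parse_lap_indices_py_spec : Claim_equal_parse_lap_indices_py := by
  intro lap_data _
  unfold Spec_parse_lap_indices_py parse_lap_indices_py parse_lap_indices_py_alt
  by_cases h : lap_data = []
  · subst h; rfl
  · rw [if_neg h]
    have := pvLoop_none (lap_data.length : Int) (PySem.List.enumerate lap_data) []
    rw [List.nil_append] at this
    rw [← this]
    rcases pvALoop (PySem.List.enumerate lap_data) [] none none with ⟨laps, cur, st⟩
    match cur, st with
    | some c, some s => rfl
    | none, _ => rfl
    | some c, none => rfl
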